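-- pv_equiv track=rewrite | github.com/tejaschauhan373/DSA | Stack and Queue/check_redundant_parenthesis.py | is_there_redundant_parenthesis
-- ===== SOURCE A (Python) =====
-- def is_there_redundant_parenthesis(expression: str):
--     stack = []
--
--     for char in expression:
--
--         if char != ")":
--             stack.append(char)
--         else:
--             found_operator = False
--             while stack and stack[-1] != "(":
--                 if stack[-1] in {"+": 0, "-": 0, "*": 0, "/": 0}:
--                     found_operator = True
--                 stack.pop()
--
--             if found_operator and stack and stack[-1] == "(":
--                 stack.pop()
--             else:
--                 return False
--
--     return True
-- ===== SOURCE B (Python) =====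
-- def is_there_redundant_parenthesis(expression: str):
--     counts = []  # per open '(' frame: number of operators seen directly inside it
--     for ch in expression:
--         if ch == '(':
--             counts.append(0)
--         elif ch in '+-*/':
--             if counts:
--                 counts[-1] += 1
--         elif ch == ')':
--             if not counts:
--                 return False
--             if counts.pop() == 0:
--                 return False
--     return True
-- ===== Notes on version B (the rewrite author's own statement) =====
-- stated objective: simpler
-- what changed: Replaces the character stack and its inner pop-and-rescan while loop with a stack of per-depth operator counts updated in constant time per character.
import Mathlib
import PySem

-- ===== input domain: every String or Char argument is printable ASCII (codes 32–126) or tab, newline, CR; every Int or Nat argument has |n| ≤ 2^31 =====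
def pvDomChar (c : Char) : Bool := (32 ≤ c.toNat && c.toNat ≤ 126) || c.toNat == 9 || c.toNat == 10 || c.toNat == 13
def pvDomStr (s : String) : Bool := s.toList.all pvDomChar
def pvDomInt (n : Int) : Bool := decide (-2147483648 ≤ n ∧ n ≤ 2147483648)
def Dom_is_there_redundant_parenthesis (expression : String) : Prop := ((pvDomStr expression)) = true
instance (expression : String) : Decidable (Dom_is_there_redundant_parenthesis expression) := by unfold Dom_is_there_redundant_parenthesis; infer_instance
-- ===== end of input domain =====

-- B replaces A's character stack and its inner pop-and-rescan loop by a stack of per-depth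
-- operator counts (simpler); the return values are proved equal.

-- ===== PORT A =====
-- tiny shared char predicate: Python's  c in {"+":0,"-":0,"*":0,"/":0}  /  c in '+-*/'
def pvIsOp (c : Char) : Bool := c = '+' || c = '-' || c = '*' || c = '/'

-- A's inner while loop: pop until '(' or empty, recording whether an operator was seen.
-- (head of the list = top of the Python stack)
def pvPopLoopA : List Char → Bool → Bool × List Char
  | [], f => (f, [])
  | c :: r, f => if c = '(' then (f, c :: r) else pvPopLoopA r (f || pvIsOp c)

def pvLoopA : List Char → List Char → Bool
  | [], _ => true
  | c :: cs, stack =>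
    if c ≠ ')' then pvLoopA cs (c :: stack)
    else
      let p := pvPopLoopA stack false
      -- "if found_operator and stack and stack[-1] == '(':"
      match p.2 with
      | '(' :: suf => if p.1 then pvLoopA cs suf else false
      | _ => false

def is_there_redundant_parenthesis (expression : String) : Bool :=
  pvLoopA expression.toList []

-- ===== PORT B =====
-- "if counts: counts[-1] += 1"
def pvBump : List Nat → List Nat
  | [] => []
  | n :: t => (n + 1) :: t

def pvLoopB : List Char → List Nat → Bool
  | [], _ => true
  | c :: cs, counts =>
    if c = '(' then pvLoopB cs (0 :: counts)
    else if pvIsOp c then pvLoopB cs (pvBump counts)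
    else if c = ')' then
      match counts with
      | [] => false
      | n :: t => if n = 0 then false else pvLoopB cs t
    else pvLoopB cs counts

def is_there_redundant_parenthesis_alt (expression : String) : Bool :=
  pvLoopB expression.toList []

-- ===== PRECONDITION & SPEC =====
def Spec_is_there_redundant_parenthesis (expression : String) (out : Bool) : Prop := out = is_there_redundant_parenthesis_alt expression
instance (expression : String) (out : Bool) : Decidable (Spec_is_there_redundant_parenthesis expression out) := by unfold Spec_is_there_redundant_parenthesis; infer_instance

-- ===== CLAIM (what is proved, stated in full; the proofs are below) =====
def Claim_equal_is_there_redundant_parenthesis : Prop := ∀ (expression : String), Dom_is_there_redundant_parenthesis expression → Spec_is_there_redundant_parenthesis expression (is_there_redundant_parenthesis expression)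

-- ===== LEMMAS AND PROOFS =====

-- Abstraction: B's count stack as a function of A's character stack.
def pvAbstr : List Char → List Nat
  | [] => []
  | c :: r =>
    if c = '(' then 0 :: pvAbstr r
    else if pvIsOp c then pvBump (pvAbstr r)
    else pvAbstr r

theorem pvPopLoopA_nil (sa : List Char) (f : Bool) (h : pvAbstr sa = []) :
    (pvPopLoopA sa f).2 = [] := by
  induction sa generalizing f with
  | nil => simp [pvPopLoopA]
  | cons c r ih =>
    by_cases hp : c = '('
    · simp [pvAbstr, hp] at h
    · by_cases hop : pvIsOp c = true
      · cases hr : pvAbstr r with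
        | nil => simpa [pvPopLoopA, hp] using ih _ hr
        | cons m t => simp [pvAbstr, hp, hop, hr, pvBump] at h
      · simp only [pvAbstr, if_neg hp, if_neg hop] at h
        simpa [pvPopLoopA, hp] using ih _ h

theorem pvPopLoopA_cons (sa : List Char) (f : Bool) (n : Nat) (t : List Nat)
    (h : pvAbstr sa = n :: t) :
    ∃ suf, pvPopLoopA sa f = (f || decide (0 < n), '(' :: suf) ∧ pvAbstr suf = t := by
  induction sa generalizing f n t with
  | nil => simp [pvAbstr] at h
  | cons c r ih =>
    by_cases hp : c = '('
    · subst hp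
      simp [pvAbstr] at h
      obtain ⟨h1, h2⟩ := h
      subst h1; subst h2
      exact ⟨r, by simp [pvPopLoopA], rfl⟩
    · by_cases hop : pvIsOp c = true
      · cases hr : pvAbstr r with
        | nil => simp [pvAbstr, hp, hop, hr, pvBump] at h
        | cons m t' =>
          simp [pvAbstr, hp, hop, hr, pvBump] at h
          obtain ⟨h1, h2⟩ := h
          subst h1; subst h2
          obtain ⟨suf, hs1, hs2⟩ := ih (f || pvIsOp c) m t' hr
          refine ⟨suf, ?_, hs2⟩
          rw [pvPopLoopA, if_neg hp, hs1]
          simp [hop]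
      · simp only [pvAbstr, if_neg hp, if_neg hop] at h
        obtain ⟨suf, hs1, hs2⟩ := ih (f || pvIsOp c) n t h
        refine ⟨suf, ?_, hs2⟩
        rw [pvPopLoopA, if_neg hp, hs1]
        simp [hop]

theorem pvLoop_agree (cs : List Char) (sa : List Char) :
    pvLoopA cs sa = pvLoopB cs (pvAbstr sa) := by
  induction cs generalizing sa with
  | nil => simp [pvLoopA, pvLoopB]
  | cons c cs ih =>
    by_cases hc : c = ')'
    · subst hc
      rw [pvLoopA]
      simp only [ne_eq, not_true_eq_false, if_false]
      cases hab : pvAbstr sa with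
      | nil =>
        have h2 := pvPopLoopA_nil sa false hab
        rw [pvLoopB.eq_def]
        rcases hp : pvPopLoopA sa false with ⟨f, rest⟩
        rw [hp] at h2; simp only at h2; subst h2
        simp [pvIsOp]
      | cons n t =>
        obtain ⟨suf, hs1, hs2⟩ := pvPopLoopA_cons sa false n t hab
        rw [hs1, pvLoopB.eq_def]
        simp only [Bool.false_or]
        by_cases hn : n = 0
        · simp [hn, pvIsOp]
        · have hpos : 0 < n := Nat.pos_of_ne_zero hn
          simp [hn, hpos, pvIsOp, ih suf, hs2]
    · rw [pvLoopA, if_pos (by simpa using hc), ih]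
      conv_rhs => rw [pvLoopB.eq_def]
      by_cases hp : c = '('
      · simp [hp, pvAbstr]
      · by_cases hop : pvIsOp c = true
        · simp [pvAbstr, hp, hop]
        · simp [pvAbstr, hp, hop, hc]

-- ===== VERDICT (by name: the statement is the Claim_ definition above) =====
theorem is_there_redundant_parenthesis_spec : Claim_equal_is_there_redundant_parenthesis := by
  intro e _
  unfold Spec_is_there_redundant_parenthesis is_there_redundant_parenthesis
    is_there_redundant_parenthesis_alt
  simpa [pvAbstr] using pvLoop_agree e.toList []
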